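-- pv_equiv track=rewrite | github.com/kkhanmohammadi/nvd_cve_study | vuln_mng/matching/search_terms_generator.py | generate_composed_search_terms
-- ===== SOURCE A (Python) =====
-- def generate_composed_search_terms(search_terms):
--     """
--     create composed of other one word search terms
--     :param search_terms:
--     :return:
--     """
--     limit = get_composed_search_terms_limit(search_terms)
--     if limit > 0:
--         composed_search_terms = []
--         composed_search_term = search_terms[0]
--         for i in range(limit):
--             composed_search_term += '_' + search_terms[i + 1]
--             composed_search_terms.insert(0, composed_search_term)
--         return composed_search_terms
--     return []
--
-- def get_composed_search_terms_limit(search_terms):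
--     st_len = len(search_terms)
--     if st_len > 0:
--         return st_len - 1
--     else:
--         return 0
-- ===== SOURCE B (Python) =====
-- def generate_composed_search_terms(search_terms):
--     """
--     create composed of other one word search terms
--     :param search_terms:
--     :return:
--     """
--     return ['_'.join(search_terms[:j]) for j in range(len(search_terms), 1, -1)]
-- ===== Notes on version B (the rewrite author's own statement) =====
-- stated objective: simpler
-- what changed: Replaces the running-accumulator loop with insert(0,...) by a single comprehension that joins each prefix slice independently, iterating slice lengths from n down to 2.
import Mathlib
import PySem

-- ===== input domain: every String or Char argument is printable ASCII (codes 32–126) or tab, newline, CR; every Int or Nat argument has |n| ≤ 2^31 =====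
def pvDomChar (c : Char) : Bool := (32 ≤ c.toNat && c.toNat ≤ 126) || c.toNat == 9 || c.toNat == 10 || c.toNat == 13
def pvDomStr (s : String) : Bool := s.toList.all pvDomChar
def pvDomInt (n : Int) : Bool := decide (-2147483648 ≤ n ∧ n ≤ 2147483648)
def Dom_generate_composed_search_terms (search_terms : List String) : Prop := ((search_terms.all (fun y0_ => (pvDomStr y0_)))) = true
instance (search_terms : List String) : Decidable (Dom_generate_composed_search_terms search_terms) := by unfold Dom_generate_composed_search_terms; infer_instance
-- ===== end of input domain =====

-- B builds each underscore-joined prefix independently with a down-counting comprehension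
-- instead of A's running accumulator extended and inserted at position 0 (objective: simpler).

-- ===== PORT A =====
-- helper get_composed_search_terms_limit, transliterated
def get_composed_search_terms_limit (search_terms : List String) : Int :=
  if (search_terms.length : Int) > 0 then (search_terms.length : Int) - 1 else 0

-- loop body: composed_search_term += '_' + search_terms[i+1]; composed_search_terms.insert(0, ...)
-- search_terms[i+1] is always in range when the loop runs (i+1 ≤ limit = len-1), so the
-- pyGetD default "" is never read.
def pvStepA (search_terms : List String) (st : String × List String) (i : Int) :
    String × List String :=
  let s := st.1 ++ ("_" ++ PySem.List.pyGetD search_terms (i + 1) "")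
  (s, s :: st.2)

def generate_composed_search_terms (search_terms : List String) : List String :=
  let limit := get_composed_search_terms_limit search_terms
  if limit > 0 then
    -- composed_search_term = search_terms[0]: in range because limit > 0 forces len ≥ 2
    ((PySem.List.pyRange 0 limit 1).foldl (pvStepA search_terms)
      (PySem.List.pyGetD search_terms 0 "", [])).2
  else []

-- ===== PORT B =====
def generate_composed_search_terms_alt (search_terms : List String) : List String :=
  (PySem.List.pyRange (search_terms.length : Int) 1 (-1)).map
    (fun j => PySem.Str.join "_" (PySem.List.slice search_terms none (some j)))

-- ===== PRECONDITION & SPEC =====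
def Spec_generate_composed_search_terms (search_terms : List String) (out : List String) : Prop := out = generate_composed_search_terms_alt search_terms
instance (search_terms : List String) (out : List String) : Decidable (Spec_generate_composed_search_terms search_terms out) := by unfold Spec_generate_composed_search_terms; infer_instance

-- ===== CLAIM (what is proved, stated in full; the proofs are below) =====
def Claim_equal_generate_composed_search_terms : Prop := ∀ (search_terms : List String), Dom_generate_composed_search_terms search_terms → Spec_generate_composed_search_terms search_terms (generate_composed_search_terms search_terms)

-- ===== LEMMAS AND PROOFS =====

-- the prefix join: J xs j = '_'.join(xs[:j])
def pvJ (xs : List String) (j : Nat) : String := PySem.Str.join "_" (xs.take j)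

-- appending one part to a nonempty join
lemma pvJoin_snoc (sep : List Char) (ps : List (List Char)) (p : List Char) (h : ps ≠ []) :
    PySem.Chars.join sep (ps ++ [p]) = PySem.Chars.join sep ps ++ sep ++ p := by
  induction ps with
  | nil => simp at h
  | cons q rest ih =>
    cases rest with
    | nil => simp [PySem.Chars.join_singleton, PySem.Chars.join_cons_cons]
    | cons r rest' =>
      simp only [List.cons_append]
      rw [PySem.Chars.join_cons_cons]
      rw [show r :: (rest' ++ [p]) = (r :: rest') ++ [p] from rfl, ih (by simp),
        PySem.Chars.join_cons_cons]
      simp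

lemma pvJ_succ (xs : List String) (j : Nat) (h1 : 1 ≤ j) (h2 : j < xs.length) :
    pvJ xs (j + 1) = pvJ xs j ++ ("_" ++ PySem.List.pyGetD xs (j : Int) "") := by
  have hget : PySem.List.pyGetD xs (j : Int) "" = xs[j] := by
    rw [PySem.List.pyGetD_natCast]
    exact List.getD_eq_getElem xs "" h2
  have htake : xs.take (j + 1) = xs.take j ++ [xs[j]] := by
    rw [List.take_add_one]; simp [List.getElem?_eq_getElem h2]
  apply String.toList_injective
  simp only [pvJ, hget, htake, PySem.Str.toList_join, List.map_append, List.map_cons,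
    List.map_nil, String.toList_append]
  rw [pvJoin_snoc _ _ _ (by simp; exact ⟨by omega, by rintro rfl; simp at h2⟩)]
  simp

-- loop invariant for A's fold
lemma pvLoopA (xs : List String) (m : Nat) (hm : m + 1 ≤ xs.length) :
    (PySem.List.pyRange 0 (m : Int) 1).foldl (pvStepA xs) (pvJ xs 1, []) =
      (pvJ xs (m + 1), ((List.range m).map (fun k => pvJ xs (k + 2))).reverse) := by
  induction m with
  | zero => simp
  | succ m ih =>
    have hsplit : PySem.List.pyRange 0 ((m + 1 : Nat) : Int) 1 =
        PySem.List.pyRange 0 (m : Int) 1 ++ [(m : Int)] := by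
      push_cast
      exact PySem.List.pyRange_one_succ_right (by positivity)
    rw [hsplit, List.foldl_append, ih (by omega)]
    have hcast : ((m : Int) + 1) = ((m + 1 : Nat) : Int) := by push_cast; ring
    have hs : pvJ xs (m + 1) ++ ("_" ++ PySem.List.pyGetD xs ((m + 1 : Nat) : Int) "") =
        pvJ xs (m + 2) := (pvJ_succ xs (m + 1) (by omega) (by omega)).symm
    simp only [List.foldl_cons, List.foldl_nil, pvStepA, hcast, hs, List.range_succ,
      List.map_append, List.map_cons, List.map_nil, List.reverse_append, List.reverse_cons,
      List.reverse_nil]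
    simp

-- B as a map over List.range
lemma pvB_eq (xs : List String) (h : 2 ≤ xs.length) :
    generate_composed_search_terms_alt xs =
      (List.range (xs.length - 1)).map (fun k => pvJ xs (xs.length - k)) := by
  unfold generate_composed_search_terms_alt
  rw [PySem.List.pyRange_neg_one, List.map_map]
  have hcnt : ((xs.length : Int) - 1).toNat = xs.length - 1 := by omega
  rw [hcnt]
  apply List.map_congr_left
  intro k hk
  simp only [List.mem_range] at hk
  have hnn : (0 : Int) ≤ (xs.length : Int) - (k : Int) := by omega
  simp only [Function.comp]
  rw [PySem.List.slice_to _ hnn]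
  have : ((xs.length : Int) - (k : Int)).toNat = xs.length - k := by omega
  rw [this]
  rfl

theorem pv_main (xs : List String) :
    generate_composed_search_terms xs = generate_composed_search_terms_alt xs := by
  by_cases h : 2 ≤ xs.length
  · -- main case
    have hlimit : get_composed_search_terms_limit xs = ((xs.length - 1 : Nat) : Int) := by
      unfold get_composed_search_terms_limit
      rw [if_pos (by exact_mod_cast Nat.lt_of_lt_of_le (by omega) h)]
      omega
    have hpos : get_composed_search_terms_limit xs > 0 := by rw [hlimit]; omega
    have hget0 : PySem.List.pyGetD xs 0 "" = pvJ xs 1 := by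
      cases xs with
      | nil => simp at h
      | cons a t =>
        rw [show (0 : Int) = ((0 : Nat) : Int) from rfl, PySem.List.pyGetD_natCast]
        apply String.toList_injective
        simp [pvJ, PySem.Str.toList_join, PySem.Chars.join_singleton]
    simp only [generate_composed_search_terms, hlimit, hget0]
    rw [if_pos (show ((xs.length - 1 : Nat) : Int) > 0 by omega)]
    rw [pvLoopA xs (xs.length - 1) (by omega)]
    rw [pvB_eq xs h]
    apply List.ext_getElem
    · simp
    · intro k h1 h2
      simp only [List.getElem_reverse, List.getElem_map, List.getElem_range,
        List.length_map, List.length_range]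
      simp only [List.length_reverse, List.length_map, List.length_range] at h1
      congr 1
      omega
  · -- len ≤ 1: both empty
    have hA : generate_composed_search_terms xs = [] := by
      have hl : ¬ (get_composed_search_terms_limit xs > 0) := by
        unfold get_composed_search_terms_limit; split_ifs <;> omega
      simp [generate_composed_search_terms, hl]
    have hB : generate_composed_search_terms_alt xs = [] := by
      unfold generate_composed_search_terms_alt
      rw [PySem.List.pyRange_neg_one_eq_nil (by omega)]
      rfl
    rw [hA, hB]

-- ===== VERDICT (by name: the statement is the Claim_ definition above) =====
theorem generate_composed_search_terms_spec : Claim_equal_generate_composed_search_terms := by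
  intro xs _
  exact pv_main xs
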